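-- pv_equiv track=rewrite | github.com/CultureBotAI/MicroMediaParam | comprehensive_ingredient_extractor.py | _deduplicate_ingredients
-- ===== SOURCE A (Python) =====
-- from typing import Dict, List, Optional, Tuple, Set
--
-- def _deduplicate_ingredients(ingredients: List[Dict]) -> List[Dict]:
--     """Remove duplicate ingredients, keeping the best version."""
--     seen = {}
--
--     for ingredient in ingredients:
--         name = ingredient['name'].lower().strip()
--
--         if name in seen:
--             # Keep the version with concentration if available
--             if ingredient.get('concentration') and not seen[name].get('concentration'):
--                 seen[name] = ingredient
--         else:
--             seen[name] = ingredient
--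
--     return list(seen.values())
-- ===== SOURCE B (Python) =====
-- def _deduplicate_ingredients(ingredients):
--     """Remove duplicate ingredients, keeping the best version."""
--     groups = {}
--     for ingredient in ingredients:
--         groups.setdefault(ingredient['name'].lower().strip(), []).append(ingredient)
--     return [next((i for i in g if i.get('concentration')), g[0])
--             for g in groups.values()]
-- ===== Notes on version B (the rewrite author's own statement) =====
-- stated objective: alternative
-- what changed: Instead of maintaining a single best-so-far dict with an inline conditional replace, B groups all ingredients by lowered-stripped name in one pass and then selects from each group the first concentration-bearing ingredient (else the first seen).
import Mathlib
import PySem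

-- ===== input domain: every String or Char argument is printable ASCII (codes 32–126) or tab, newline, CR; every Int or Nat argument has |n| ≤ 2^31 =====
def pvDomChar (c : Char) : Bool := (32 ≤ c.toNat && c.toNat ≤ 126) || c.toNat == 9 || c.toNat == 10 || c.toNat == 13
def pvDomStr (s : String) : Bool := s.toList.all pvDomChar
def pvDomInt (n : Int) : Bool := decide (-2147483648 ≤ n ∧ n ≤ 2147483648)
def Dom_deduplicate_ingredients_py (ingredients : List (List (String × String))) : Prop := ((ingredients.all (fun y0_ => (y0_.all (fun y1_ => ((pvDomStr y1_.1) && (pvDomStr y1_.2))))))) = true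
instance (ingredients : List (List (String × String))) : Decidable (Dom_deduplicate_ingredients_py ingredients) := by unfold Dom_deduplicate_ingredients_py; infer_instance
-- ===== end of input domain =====

-- B groups ingredients by lowered-stripped name in one pass, then selects per group the first
-- concentration-bearing entry (else the first seen), instead of A's best-so-far dict with inline replace.


-- shared helpers: ingredient['key'] on the assoc-list encoding of a Python dict (first match)
def pvLookup (d : List (String × String)) (k : String) : Option String :=
  (d.find? (fun p => p.1 == k)).map (·.2)

-- ingredient['name'].lower().strip(); Pre_ excludes the KeyError case (no 'name' key), so getD "" is never reached there
def pvNameKey (ing : List (String × String)) : String :=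
  PySem.Str.strip (PySem.Str.lower ((pvLookup ing "name").getD ""))

-- truthiness of ingredient.get('concentration'): a present, non-empty string
def pvConc (ing : List (String × String)) : Bool :=
  ((pvLookup ing "concentration").getD "") != ""

-- ===== PORT A =====
def pvStepA (seen : PySem.Dict String (List (String × String))) (ing : List (String × String)) :
    PySem.Dict String (List (String × String)) :=
  let name := pvNameKey ing
  if seen.contains name then
    if pvConc ing && !(pvConc (seen.getD name [])) then seen.insert name ing else seen
  else seen.insert name ing

def deduplicate_ingredients_py (ingredients : List (List (String × String))) : List (List (String × String)) :=
  (ingredients.foldl pvStepA PySem.Dict.empty).values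

-- ===== PORT B =====
-- groups.setdefault(name, []).append(ingredient)
def pvStepB (groups : PySem.Dict String (List (List (String × String)))) (ing : List (String × String)) :
    PySem.Dict String (List (List (String × String))) :=
  groups.modify (pvNameKey ing) [] (· ++ [ing])

-- next((i for i in g if i.get('concentration')), g[0])
def pvSelect (g : List (List (String × String))) : List (String × String) :=
  (g.find? pvConc).getD (g.headD [])

def deduplicate_ingredients_py_alt (ingredients : List (List (String × String))) : List (List (String × String)) :=
  ((ingredients.foldl pvStepB PySem.Dict.empty).values).map pvSelect

-- ===== PRECONDITION & SPEC =====
-- Pre_ excludes exactly the inputs where the Python A raises KeyError: an ingredient dict without a 'name' key.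
def Pre_deduplicate_ingredients_py (ingredients : List (List (String × String))) : Prop :=
  (ingredients.all (fun ing => ing.any (fun p => p.1 == "name"))) = true
instance (ingredients : List (List (String × String))) : Decidable (Pre_deduplicate_ingredients_py ingredients) := by unfold Pre_deduplicate_ingredients_py; infer_instance

def pvWitness_deduplicate_ingredients_py : (List (List (String × String))) :=
  [[("name", "Glucose"), ("source", "x")], [("name", " glucose"), ("concentration", "5 g/L")], [("name", "NaCl")]]

def Spec_deduplicate_ingredients_py (ingredients : List (List (String × String))) (out : List (List (String × String))) : Prop := out = deduplicate_ingredients_py_alt ingredients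
instance (ingredients : List (List (String × String))) (out : List (List (String × String))) : Decidable (Spec_deduplicate_ingredients_py ingredients out) := by unfold Spec_deduplicate_ingredients_py; infer_instance

-- ===== CLAIM (what is proved, stated in full; the proofs are below) =====
def Claim_equal_deduplicate_ingredients_py : Prop := ∀ (ingredients : List (List (String × String))), Dom_deduplicate_ingredients_py ingredients → Pre_deduplicate_ingredients_py ingredients → Spec_deduplicate_ingredients_py ingredients (deduplicate_ingredients_py ingredients)

-- ===== LEMMAS AND PROOFS =====

-- the correspondence between A's best-so-far entry and B's group: A stores pvSelect of the group
def pvFix (p : String × List (List (String × String))) : String × List (String × String) :=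
  (p.1, pvSelect p.2)

theorem pvSelect_singleton (x : List (String × String)) : pvSelect [x] = x := by
  unfold pvSelect
  by_cases h : pvConc x = true <;> simp [List.find?, h]

theorem pvSelect_append (g : List (List (String × String))) (x : List (String × String)) (hg : g ≠ []) :
    pvSelect (g ++ [x]) = if pvConc x && !(pvConc (pvSelect g)) then x else pvSelect g := by
  cases h : g.find? pvConc with
  | some y =>
      have hy : pvConc y = true := List.find?_some h
      have hsel : pvSelect g = y := by unfold pvSelect; simp [h]
      simp [pvSelect, List.find?_append, h, hy]
  | none =>
      cases g with
      | nil => exact absurd rfl hg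
      | cons a t =>
        have ha : pvConc a = false := by
          have := List.find?_eq_none.mp h a (by simp)
          simpa using this
        have ht : t.find? pvConc = none := by
          simpa [List.find?_cons, ha] using h
        by_cases hx : pvConc x = true
        · simp [pvSelect, List.find?_append, List.find?, hx, ha, ht]
        · simp only [Bool.not_eq_true] at hx
          simp [pvSelect, List.find?_append, List.find?, hx, ha, ht]

theorem pvGet?_map_fix (l : List (String × List (List (String × String)))) (k : String) :
    (PySem.Dict.mk (l.map pvFix)).get? k = ((PySem.Dict.mk l).get? k).map pvSelect := by
  induction l with
  | nil => simp [PySem.Dict.get?]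
  | cons p t ih =>
      obtain ⟨pk, pv⟩ := p
      simp only [List.map, pvFix, PySem.Dict.get?_mk_cons]
      by_cases h : pk == k <;> simp [h, ih]

theorem pvContains_map_fix (l : List (String × List (List (String × String)))) (k : String) :
    (PySem.Dict.mk (l.map pvFix)).contains k = (PySem.Dict.mk l).contains k := by
  simp only [PySem.Dict.contains_mk, List.any_map]
  rfl

def pvInv (a : PySem.Dict String (List (String × String)))
    (g : PySem.Dict String (List (List (String × String)))) : Prop :=
  a.items = g.items.map pvFix ∧ (∀ p ∈ g.items, p.2 ≠ []) ∧ g.keys.Nodup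

theorem pvInv_step (a : PySem.Dict String (List (String × String)))
    (g : PySem.Dict String (List (List (String × String)))) (ing : List (String × String))
    (h : pvInv a g) : pvInv (pvStepA a ing) (pvStepB g ing) := by
  obtain ⟨h1, h2, h3⟩ := h
  have ha : a = PySem.Dict.mk (g.items.map pvFix) := PySem.Dict.ext h1
  have hc : a.contains (pvNameKey ing) = g.contains (pvNameKey ing) := by
    rw [ha]; exact pvContains_map_fix g.items _
  have hget : a.get? (pvNameKey ing) = (g.get? (pvNameKey ing)).map pvSelect := by
    rw [ha]; exact pvGet?_map_fix g.items _
  unfold pvStepA pvStepB PySem.Dict.modify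
  dsimp only
  by_cases hcg : g.contains (pvNameKey ing) = true
  · obtain ⟨grp, hgrp⟩ : ∃ grp, g.get? (pvNameKey ing) = some grp := by
      have := PySem.Dict.contains_eq_isSome_get? g (pvNameKey ing)
      rw [hcg] at this
      exact Option.isSome_iff_exists.mp this.symm
    have hmem : (pvNameKey ing, grp) ∈ g.items := PySem.Dict.mem_items_of_get?_eq_some g hgrp
    have hgrp_ne : grp ≠ [] := h2 _ hmem
    have hgD : g.getD (pvNameKey ing) [] = grp := PySem.Dict.getD_of_get?_eq_some g [] hgrp
    have haD : a.getD (pvNameKey ing) [] = pvSelect grp := by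
      rw [PySem.Dict.getD_eq_get?_getD, hget, hgrp]; rfl
    rw [hc, hgD, haD]
    simp only [hcg, if_true]
    have hitemsB := PySem.Dict.items_insert_of_contains g (grp ++ [ing]) hcg
    by_cases hcond : (pvConc ing && !(pvConc (pvSelect grp))) = true
    · rw [hcond]
      simp only [if_true]
      refine ⟨?_, ?_, ?_⟩
      · rw [PySem.Dict.items_insert_of_contains a ing (by rw [hc]; exact hcg), h1, hitemsB,
          List.map_map, List.map_map]
        refine List.map_congr_left (fun p _ => ?_)
        by_cases hp : (p.1 == pvNameKey ing) = true
        · simp [Function.comp, pvFix, hp, pvSelect_append grp ing hgrp_ne, hcond]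
        · simp [Function.comp, pvFix, hp]
      · intro p hp
        rw [hitemsB] at hp
        obtain ⟨q, hq, hqe⟩ := List.mem_map.mp hp
        by_cases hq1 : (q.1 == pvNameKey ing) = true <;> simp [hq1] at hqe <;>
          [ (rw [← hqe]; simp) ; (rw [← hqe]; exact h2 q hq) ]
      · exact PySem.Dict.nodup_keys_insert g _ _ h3
    · rw [Bool.not_eq_true] at hcond
      rw [hcond]
      simp only [if_false, Bool.false_eq_true]
      refine ⟨?_, ?_, ?_⟩
      · rw [h1, hitemsB, List.map_map]
        refine List.map_congr_left (fun p hpmem => ?_)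
        by_cases hp : (p.1 == pvNameKey ing) = true
        · have hp1 : p.1 = pvNameKey ing := by simpa using hp
          have hp2 : p.2 = grp := by
            have := PySem.Dict.get?_of_mem_items g (k := p.1) (v := p.2) hpmem h3
            rw [hp1, hgrp] at this
            exact (Option.some_inj.mp this).symm
          simp [Function.comp, pvFix, hp1, hp2,
            pvSelect_append grp ing hgrp_ne, hcond]
        · simp [Function.comp, pvFix, hp]
      · intro p hp
        rw [hitemsB] at hp
        obtain ⟨q, hq, hqe⟩ := List.mem_map.mp hp
        by_cases hq1 : (q.1 == pvNameKey ing) = true <;> simp [hq1] at hqe <;>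
          [ (rw [← hqe]; simp) ; (rw [← hqe]; exact h2 q hq) ]
      · exact PySem.Dict.nodup_keys_insert g _ _ h3
  · rw [hc]
    simp only [hcg, if_false, Bool.false_eq_true]
    have hgD : g.getD (pvNameKey ing) [] = [] :=
      PySem.Dict.getD_of_not_contains g [] (by simpa using hcg)
    rw [hgD]
    refine ⟨?_, ?_, ?_⟩
    · rw [PySem.Dict.items_insert_of_not_contains a ing (by rw [hc]; simpa using hcg),
        PySem.Dict.items_insert_of_not_contains g _ (by simpa using hcg), h1, List.map_append]
      simp [pvFix, pvSelect_singleton]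
    · intro p hp
      rw [PySem.Dict.items_insert_of_not_contains g _ (by simpa using hcg)] at hp
      rcases List.mem_append.mp hp with hp' | hp'
      · exact h2 p hp'
      · simp only [List.mem_singleton] at hp'
        rw [hp']; simp
    · exact PySem.Dict.nodup_keys_insert g _ _ h3

theorem pvInv_fold (l : List (List (String × String)))
    (a : PySem.Dict String (List (String × String)))
    (g : PySem.Dict String (List (List (String × String))))
    (h : pvInv a g) : pvInv (l.foldl pvStepA a) (l.foldl pvStepB g) := by
  induction l generalizing a g with
  | nil => exact h
  | cons x t ih => exact ih _ _ (pvInv_step a g x h)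

-- ===== VERDICT (by name: the statement is the Claim_ definition above) =====
theorem deduplicate_ingredients_py_spec : Claim_equal_deduplicate_ingredients_py := by
  intro ingredients _ _
  show _ = _
  unfold deduplicate_ingredients_py deduplicate_ingredients_py_alt
  have h := pvInv_fold ingredients PySem.Dict.empty PySem.Dict.empty
    ⟨rfl, by simp [PySem.Dict.empty], by simp [PySem.Dict.empty, PySem.Dict.keys]⟩
  rw [PySem.Dict.values, PySem.Dict.values, h.1, List.map_map, List.map_map]
  rfl
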